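-- pv_equiv track=rewrite | github.com/Ashishkumar448/GFG-Problem-of-the-day | 2025-10-October-GFG-POTD/October 28 - Distance of nearest cell having 1/Solution.py | nearest
-- ===== SOURCE A (Python) =====
-- from collections import deque
--
-- def nearest(grid):
--     n, m = len(grid), len(grid[0])
--     dist = [[-1] * m for _ in range(n)]
--     q = deque()
--
--     # Initialize queue with all 1's
--     for i in range(n):
--         for j in range(m):
--             if grid[i][j] == 1:
--                 dist[i][j] = 0
--                 q.append((i, j))
--
--     # Directions: up, down, left, right
--     directions = [(-1, 0), (1, 0), (0, -1), (0, 1)]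
--
--     # BFS
--     while q:
--         x, y = q.popleft()
--         for dx, dy in directions:
--             nx, ny = x + dx, y + dy
--             if 0 <= nx < n and 0 <= ny < m and dist[nx][ny] == -1:
--                 dist[nx][ny] = dist[x][y] + 1
--                 q.append((nx, ny))
--
--     return dist
-- ===== SOURCE B (Python) =====
-- def nearest(grid):
--     n, m = len(grid), len(grid[0])
--     ones = [(a, b) for a in range(n) for b in range(m) if grid[a][b] == 1]
--     return [[(-1 if not ones else min(abs(i - a) + abs(j - b) for a, b in ones))
--              for j in range(m)]
--             for i in range(n)]
-- ===== Notes on version B (the rewrite author's own statement) =====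
-- stated objective: simpler
-- what changed: Replaced the multi-source BFS with a deque and mutable dist matrix by a per-cell closed form: the minimum Manhattan distance to the list of 1-cells (equal to BFS distance since the grid has no obstacles), -1 when there are no 1-cells.
import Mathlib
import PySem

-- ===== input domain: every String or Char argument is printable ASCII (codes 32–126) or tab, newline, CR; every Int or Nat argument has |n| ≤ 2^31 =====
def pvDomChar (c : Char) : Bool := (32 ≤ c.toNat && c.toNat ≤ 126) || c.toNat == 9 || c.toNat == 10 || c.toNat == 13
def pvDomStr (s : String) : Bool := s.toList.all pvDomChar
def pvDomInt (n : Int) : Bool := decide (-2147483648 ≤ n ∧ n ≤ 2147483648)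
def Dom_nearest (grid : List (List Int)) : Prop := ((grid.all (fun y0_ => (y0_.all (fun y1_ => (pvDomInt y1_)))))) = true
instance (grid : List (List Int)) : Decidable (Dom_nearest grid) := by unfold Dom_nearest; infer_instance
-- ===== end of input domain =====

-- B replaces the BFS by a per-cell minimum of Manhattan distances to the 1-cells (no obstacles, so equal); objective: simpler.

-- ===== PORT A =====
-- shared tiny getter: grid[i][j]; default never read under Pre_ (indices produced in range)
def gGet (grid : List (List Int)) (i j : Nat) : Int := (grid.getD i []).getD j 0
-- dist[i][j]; all reads of dist in A are guarded in range, default never read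
def dGet (dist : List (List Int)) (i j : Nat) : Int := (dist.getD i []).getD j (-1)
-- dist[i][j] = v
def dSet (dist : List (List Int)) (i j : Nat) (v : Int) : List (List Int) :=
  dist.set i ((dist.getD i []).set j v)

-- the init double loop: for i in range(n): for j in range(m): if grid[i][j]==1: dist[i][j]=0; q.append((i,j))
-- (loop indices are the nonnegative range values, kept as Nat)
def initFold (grid : List (List Int)) (n m : Nat) : List (List Int) × List (Nat × Nat) :=
  (List.range n).foldl (fun st i =>
    (List.range m).foldl (fun st j =>
      if gGet grid i j = 1 then (dSet st.1 i j 0, st.2 ++ [(i, j)]) else st) st)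
    (List.replicate n (List.replicate m (-1)), [])

def dirsA : List (Int × Int) := [(-1, 0), (1, 0), (0, -1), (0, 1)]

-- one neighbour update of the BFS body (x,y popped; the four dirs are folded over this)
def stepA (n m x y : Nat) (st : List (List Int) × List (Nat × Nat)) (d : Int × Int) :
    List (List Int) × List (Nat × Nat) :=
  let nx : Int := (x : Int) + d.1
  let ny : Int := (y : Int) + d.2
  if 0 ≤ nx ∧ nx < (n : Int) ∧ 0 ≤ ny ∧ ny < (m : Int) ∧ dGet st.1 nx.toNat ny.toNat = -1 then
    (dSet st.1 nx.toNat ny.toNat (dGet st.1 x y + 1), st.2 ++ [(nx.toNat, ny.toNat)])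
  else st

-- the while loop; fuel is only a termination guard (proved sufficient: it bounds the number of pops)
def bfsLoop (n m : Nat) : Nat → List (List Int) → List (Nat × Nat) → List (List Int)
  | 0, dist, _ => dist
  | _ + 1, dist, [] => dist
  | fuel + 1, dist, (x, y) :: rest =>
      let st := dirsA.foldl (stepA n m x y) (dist, rest)
      bfsLoop n m fuel st.1 st.2

def nearest (grid : List (List Int)) : List (List Int) :=
  let n := grid.length
  let m := (grid.headD []).length
  let st := initFold grid n m
  bfsLoop n m (n * m + st.2.length) st.1 st.2

-- ===== PORT B =====
-- ones = [(a,b) for a in range(n) for b in range(m) if grid[a][b] == 1]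
def onesOf (grid : List (List Int)) (n m : Nat) : List (Nat × Nat) :=
  (List.range n).flatMap (fun a => (List.range m).filterMap (fun b =>
    if gGet grid a b = 1 then some (a, b) else none))

-- -1 if not ones else min(abs(i-a)+abs(j-b) for (a,b) in ones)   (min() ported as List.min?)
def cellB (ones : List (Nat × Nat)) (i j : Nat) : Int :=
  match (ones.map (fun p => |(i : Int) - p.1| + |(j : Int) - p.2|)).min? with
  | none => -1
  | some v => v

def nearest_alt (grid : List (List Int)) : List (List Int) :=
  let n := grid.length
  let m := (grid.headD []).length
  let ones := onesOf grid n m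
  (List.range n).map (fun i => (List.range m).map (fun j => cellB ones i j))

-- ===== PRECONDITION & SPEC =====
-- Pre_ excludes exactly the inputs where A raises IndexError: the empty grid (grid[0]) and
-- grids with a row shorter than row 0 (grid[i][j] for j < len(grid[0])).
def Pre_nearest (grid : List (List Int)) : Prop :=
  grid ≠ [] ∧ ∀ row ∈ grid, (grid.headD []).length ≤ row.length
instance (grid : List (List Int)) : Decidable (Pre_nearest grid) := by unfold Pre_nearest; infer_instance

def pvWitness_nearest : List (List Int) := [[0, 1], [0, 0]]

def Spec_nearest (grid : List (List Int)) (out : List (List Int)) : Prop := out = nearest_alt grid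
instance (grid : List (List Int)) (out : List (List Int)) : Decidable (Spec_nearest grid out) := by unfold Spec_nearest; infer_instance

-- ===== CLAIM (what is proved, stated in full; the proofs are below) =====
def Claim_equal_nearest : Prop := ∀ (grid : List (List Int)), Dom_nearest grid → Pre_nearest grid → Spec_nearest grid (nearest grid)

-- ===== LEMMAS AND PROOFS =====

-- proof-land notions: Manhattan distance, nearest-one distance, count of unset cells
def fD (c p : Nat × Nat) : Int := |(c.1 : Int) - (p.1 : Int)| + |(c.2 : Int) - (p.2 : Int)|

def Tm (g : List (List Int)) (n m : Nat) (c : Nat × Nat) : Option Int :=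
  ((onesOf g n m).map (fD c)).min?

def negCount (dist : List (List Int)) : Nat :=
  (dist.map (fun row => row.countP (fun v => decide (v = -1)))).sum

-- ---- generic list/grid helpers ----

lemma shaped_row_len {dist : List (List Int)} {n m : Nat} (h : dist.length = n ∧ ∀ row ∈ dist, row.length = m)
    {i : Nat} (hi : i < n) : (dist.getD i []).length = m := by
  have hlt : i < dist.length := by omega
  rw [List.getD_eq_getElem _ _ hlt]
  exact h.2 _ (List.getElem_mem hlt)

lemma getD_set' {a : Type} (l : List a) (i i' : Nat) (x d : a) :
    (l.set i x).getD i' d = if i = i' ∧ i < l.length then x else l.getD i' d := by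
  by_cases h1 : i = i'
  · subst h1
    by_cases h2 : i < l.length
    · simp [List.getD_eq_getElem?_getD, h2]
    · rw [List.set_eq_of_length_le (by omega)]
      simp [h2]
  · simp [List.getD_eq_getElem?_getD, h1]

lemma dGet_dSet_self {dist : List (List Int)} {i j : Nat} {v : Int}
    (hi : i < dist.length) (hj : j < (dist.getD i []).length) :
    dGet (dSet dist i j v) i j = v := by
  unfold dGet dSet
  rw [getD_set', if_pos ⟨rfl, hi⟩, getD_set', if_pos ⟨rfl, hj⟩]

lemma dGet_dSet_ne {dist : List (List Int)} {i j i' j' : Nat} {v : Int}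
    (hne : i ≠ i' ∨ j ≠ j') :
    dGet (dSet dist i j v) i' j' = dGet dist i' j' := by
  unfold dGet dSet
  rw [getD_set']
  split_ifs with h1
  · obtain ⟨rfl, _⟩ := h1
    have hj : j ≠ j' := by tauto
    rw [getD_set']
    split_ifs with h2
    · exact absurd h2.1 hj
    · rfl
  · rfl

lemma shaped_dSet {dist : List (List Int)} {n m : Nat} {i j : Nat} {v : Int}
    (h : dist.length = n ∧ ∀ row ∈ dist, row.length = m) :
    (dSet dist i j v).length = n ∧ ∀ row ∈ dSet dist i j v, row.length = m := by
  unfold dSet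
  refine ⟨by simpa using h.1, ?_⟩
  intro row hrow
  by_cases hlt : i < dist.length
  · rcases List.mem_or_eq_of_mem_set hrow with h' | h'
    · exact h.2 _ h'
    · rw [h', List.length_set, List.getD_eq_getElem _ _ hlt]
      exact h.2 _ (List.getElem_mem hlt)
  · rw [List.set_eq_of_length_le (by omega)] at hrow
    exact h.2 _ hrow

lemma negCount_dSet {dist : List (List Int)} {i j : Nat} {v : Int}
    (hi : i < dist.length) (hj : j < (dist.getD i []).length)
    (hold : dGet dist i j = -1) (hv : v ≠ -1) :
    negCount (dSet dist i j v) + 1 = negCount dist := by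
  unfold negCount dSet
  unfold dGet at hold
  induction dist generalizing i with
  | nil => simp at hi
  | cons r t ih =>
    cases i with
    | zero =>
      simp only [List.getD_cons_zero] at hold hj
      simp only [List.set_cons_zero, List.map_cons, List.sum_cons, List.getD_cons_zero]
      rw [List.countP_set hj]
      have hr : r[j] = -1 := by rwa [List.getD_eq_getElem _ _ hj] at hold
      have hpos : 0 < r.countP (fun v => decide (v = -1)) :=
        List.countP_pos_iff.mpr ⟨r[j], List.getElem_mem hj, by simp [hr]⟩
      simp only [hr, hv, decide_true]
      simp
      omega
    | succ i =>
      simp only [List.getD_cons_succ] at hold hj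
      simp only [List.getD_cons_succ, List.set_cons_succ, List.map_cons, List.sum_cons]
      have := ih (by simpa using hi) hj hold
      omega

lemma negCount_le {dist : List (List Int)} {n m : Nat}
    (h : dist.length = n ∧ ∀ row ∈ dist, row.length = m) : negCount dist ≤ m * n := by
  unfold negCount
  calc (dist.map (fun row => row.countP (fun v => decide (v = -1)))).sum
      ≤ (dist.map (fun row => row.countP (fun v => decide (v = -1)))).length • m := by
        apply List.sum_le_card_nsmul
        intro x hx
        obtain ⟨row, hrow, rfl⟩ := List.mem_map.mp hx
        calc row.countP _ ≤ row.length := List.countP_le_length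
        _ = m := h.2 _ hrow
    _ = m * n := by simp [h.1]; ring

-- ---- fD / Tm facts ----

lemma absSubCast (a b : Nat) : |(a : Int) - (b : Int)| = ((Nat.dist a b : Nat) : Int) := by
  rcases le_total a b with h | h
  · rw [Nat.dist_eq_sub_of_le h, abs_of_nonpos (by omega)]
    omega
  · rw [Nat.dist_eq_sub_of_le_right h, abs_of_nonneg (by omega)]
    omega

lemma fD_natCast (c p : Nat × Nat) :
    fD c p = ((Nat.dist c.1 p.1 + Nat.dist c.2 p.2 : Nat) : Int) := by
  unfold fD
  rw [absSubCast, absSubCast]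
  push_cast
  ring

lemma fD_nonneg (c p : Nat × Nat) : 0 ≤ fD c p := by
  rw [fD_natCast]; positivity

lemma fD_comm (c p : Nat × Nat) : fD c p = fD p c := by
  simp [fD_natCast, Nat.dist_comm]

lemma fD_self (c : Nat × Nat) : fD c c = 0 := by
  simp [fD_natCast, Nat.dist_self]

lemma fD_eq_zero {c p : Nat × Nat} (h : fD c p = 0) : c = p := by
  rw [fD_natCast] at h
  have : Nat.dist c.1 p.1 + Nat.dist c.2 p.2 = 0 := by exact_mod_cast h
  simp [Nat.dist] at this
  obtain ⟨⟨h1, h2⟩, h3, h4⟩ := this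
  exact Prod.ext (by omega) (by omega)

lemma fD_triangle (a b c : Nat × Nat) : fD a c ≤ fD a b + fD b c := by
  unfold fD
  have h1 := abs_sub_le ((a.1 : Int)) (b.1 : Int) (c.1 : Int)
  have h2 := abs_sub_le ((a.2 : Int)) (b.2 : Int) (c.2 : Int)
  linarith

lemma mem_onesOf {g : List (List Int)} {n m : Nat} {p : Nat × Nat} :
    p ∈ onesOf g n m ↔ p.1 < n ∧ p.2 < m ∧ gGet g p.1 p.2 = 1 := by
  unfold onesOf
  rcases p with ⟨a, b⟩
  simp only [List.mem_flatMap, List.mem_filterMap, List.mem_range]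
  constructor
  · rintro ⟨a', ha', b', hb', h⟩
    split at h
    · rename_i hone
      obtain ⟨rfl, rfl⟩ := Prod.mk.injEq .. ▸ (Option.some.injEq .. ▸ h)
      exact ⟨ha', hb', hone⟩
    · exact absurd h (by simp)
  · rintro ⟨ha, hb, hone⟩
    exact ⟨a, ha, b, hb, by simp [hone]⟩

lemma Tm_some_iff {g : List (List Int)} {n m : Nat} {c : Nat × Nat} {k : Int} :
    Tm g n m c = some k ↔
      ((∃ p ∈ onesOf g n m, fD c p = k) ∧ ∀ p ∈ onesOf g n m, k ≤ fD c p) := by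
  unfold Tm
  rw [List.min?_eq_some_iff]
  simp only [List.mem_map]
  constructor
  · rintro ⟨⟨p, hp, hfp⟩, hle⟩
    exact ⟨⟨p, hp, hfp⟩, fun p hp => hle _ ⟨p, hp, rfl⟩⟩
  · rintro ⟨⟨p, hp, hfp⟩, hle⟩
    exact ⟨⟨p, hp, hfp⟩, by rintro b ⟨p', hp', rfl⟩; exact hle _ hp'⟩

lemma Tm_nonneg {g : List (List Int)} {n m : Nat} {c : Nat × Nat} {k : Int}
    (h : Tm g n m c = some k) : 0 ≤ k := by
  obtain ⟨⟨p, _, hfp⟩, _⟩ := Tm_some_iff.mp h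
  have := fD_nonneg c p
  omega

lemma Tm_some_of_some {g : List (List Int)} {n m : Nat} {c c' : Nat × Nat} {k : Int}
    (h : Tm g n m c = some k) : ∃ k', Tm g n m c' = some k' := by
  unfold Tm at *
  rcases h' : ((onesOf g n m).map (fD c')).min? with _ | k'
  · rw [List.min?_eq_none_iff] at h'
    simp only [List.map_eq_nil_iff] at h'
    rw [h'] at h
    simp at h
  · exact ⟨k', rfl⟩

lemma Tm_of_mem {g : List (List Int)} {n m : Nat} {c : Nat × Nat}
    (h : c ∈ onesOf g n m) : Tm g n m c = some 0 := by
  rw [Tm_some_iff]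
  exact ⟨⟨c, h, fD_self c⟩, fun p _ => fD_nonneg c p⟩

lemma Tm_zero_mem {g : List (List Int)} {n m : Nat} {c : Nat × Nat}
    (h : Tm g n m c = some 0) : c ∈ onesOf g n m := by
  obtain ⟨⟨p, hp, hfp⟩, _⟩ := Tm_some_iff.mp h
  rwa [fD_eq_zero hfp]

lemma Tm_adj {g : List (List Int)} {n m : Nat} {c c' : Nat × Nat} {k k' : Int}
    (hadj : fD c c' = 1) (h : Tm g n m c = some k) (h' : Tm g n m c' = some k') :
    k' ≤ k + 1 := by
  obtain ⟨⟨p, hp, hfp⟩, _⟩ := Tm_some_iff.mp h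
  obtain ⟨_, hle'⟩ := Tm_some_iff.mp h'
  have h1 := hle' p hp
  have h2 := fD_triangle c' c p
  rw [fD_comm c' c, hadj] at h2
  omega

lemma Tm_step_aux {g : List (List Int)} {n m : Nat} {c c' o : Nat × Nat} {k : Int}
    (ho : o ∈ onesOf g n m) (h : Tm g n m c = some k)
    (hadj : fD c c' = 1) (hco : fD c' o = k - 1) : Tm g n m c' = some (k - 1) := by
  obtain ⟨k', hk'⟩ := Tm_some_of_some (c' := c') h
  have h1 : k' ≤ k - 1 := hco ▸ (Tm_some_iff.mp hk').2 o ho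
  have h2 : k ≤ k' + 1 := Tm_adj (by rwa [fD_comm]) hk' h
  have h3 : k' = k - 1 := by omega
  rwa [h3] at hk'

lemma Tm_step {g : List (List Int)} {n m : Nat} {c : Nat × Nat} {k : Int}
    (hc1 : c.1 < n) (hc2 : c.2 < m) (h : Tm g n m c = some k) (hk : 1 ≤ k) :
    ∃ c' : Nat × Nat, c'.1 < n ∧ c'.2 < m ∧ fD c c' = 1 ∧ Tm g n m c' = some (k - 1) := by
  obtain ⟨⟨o, ho, hfo⟩, hle⟩ := Tm_some_iff.mp h
  obtain ⟨ho1, ho2, _⟩ := mem_onesOf.mp ho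
  rw [fD_natCast] at hfo
  simp only [Nat.dist] at hfo
  rcases Nat.lt_trichotomy c.1 o.1 with hlt | heq | hgt
  · refine ⟨(c.1 + 1, c.2), by omega, hc2, ?_, Tm_step_aux ho h ?_ ?_⟩ <;>
      (rw [fD_natCast]; simp only [Nat.dist]; push_cast; omega)
  · rcases Nat.lt_trichotomy c.2 o.2 with hlt2 | heq2 | hgt2
    · refine ⟨(c.1, c.2 + 1), hc1, by omega, ?_, Tm_step_aux ho h ?_ ?_⟩ <;>
        (rw [fD_natCast]; simp only [Nat.dist]; push_cast; omega)
    · exfalso; omega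
    · refine ⟨(c.1, c.2 - 1), hc1, by omega, ?_, Tm_step_aux ho h ?_ ?_⟩ <;>
        (rw [fD_natCast]; simp only [Nat.dist]; push_cast; omega)
  · refine ⟨(c.1 - 1, c.2), by omega, hc2, ?_, Tm_step_aux ho h ?_ ?_⟩ <;>
      (rw [fD_natCast]; simp only [Nat.dist]; push_cast; omega)

-- ---- the target matrix and the B side ----

lemma nearest_alt_eq (g : List (List Int)) :
    nearest_alt g = (List.range g.length).map (fun i =>
      (List.range (g.headD []).length).map (fun j =>
        cellB (onesOf g g.length (g.headD []).length) i j)) := rfl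

lemma cellB_eq_Tm (g : List (List Int)) (n m : Nat) (i j : Nat) :
    cellB (onesOf g n m) i j = (match Tm g n m (i, j) with | none => -1 | some v => v) := rfl

-- ---- the invariant ----

def BfsInv (g : List (List Int)) (n m : Nat) (dist : List (List Int)) (q : List (Nat × Nat)) : Prop :=
  (dist.length = n ∧ ∀ row ∈ dist, row.length = m) ∧
  (∀ i j, i < n → j < m → dGet dist i j ≠ -1 → Tm g n m (i, j) = some (dGet dist i j)) ∧
  (∀ p ∈ q, p.1 < n ∧ p.2 < m ∧ dGet dist p.1 p.2 ≠ -1) ∧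
  (∃ d a b, q.map (fun p => dGet dist p.1 p.2) = List.replicate a d ++ List.replicate b (d + 1)) ∧
  (∀ p rest, q = p :: rest → ∀ i j, i < n → j < m → ∀ k, Tm g n m (i, j) = some k →
      k ≤ dGet dist p.1 p.2 → dGet dist i j ≠ -1) ∧
  (∀ i j, i < n → j < m → gGet g i j = 1 → dGet dist i j ≠ -1) ∧
  (∀ i j, i < n → j < m → dGet dist i j = -1 → ∀ k, Tm g n m (i, j) = some k →
      ∃ p : Nat × Nat, p.1 < n ∧ p.2 < m ∧ fD (i, j) p = 1 ∧ Tm g n m p = some (k - 1) ∧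
        (p ∈ q ∨ dGet dist p.1 p.2 = -1))

-- mid-pop invariant while folding the four directions
def Mid (n m : Nat) (dist : List (List Int)) (v : Int) (x y : Nat)
    (rest : List (Nat × Nat)) (st : List (List Int) × List (Nat × Nat)) : Prop :=
  (st.1.length = n ∧ ∀ row ∈ st.1, row.length = m) ∧
  (∀ i j, dGet dist i j ≠ -1 → dGet st.1 i j = dGet dist i j) ∧
  (∀ i j, i < n → j < m → dGet st.1 i j ≠ -1 →
      dGet dist i j ≠ -1 ∨ (fD (x, y) (i, j) = 1 ∧ dGet st.1 i j = v + 1 ∧ (i, j) ∈ st.2)) ∧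
  (∃ app, st.2 = rest ++ app ∧ (∀ p ∈ app, p.1 < n ∧ p.2 < m ∧ fD (x, y) p = 1 ∧
      dGet st.1 p.1 p.2 = v + 1) ∧ negCount st.1 + app.length = negCount dist)

lemma stepA_mid {n m : Nat} {dist : List (List Int)} {v : Int} {x y : Nat}
    {rest : List (Nat × Nat)} {st : List (List Int) × List (Nat × Nat)} {d : Int × Int}
    (hd : |d.1| + |d.2| = 1)
    (hsh : dist.length = n ∧ ∀ row ∈ dist, row.length = m)
    (hv : dGet dist x y = v) (hv0 : 0 ≤ v)
    (hM : Mid n m dist v x y rest st) :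
    Mid n m dist v x y rest (stepA n m x y st d) ∧
    (∀ i j, dGet st.1 i j ≠ -1 → dGet (stepA n m x y st d).1 i j = dGet st.1 i j) ∧
    (∀ i j, i < n → j < m → (x : Int) + d.1 = (i : Int) → (y : Int) + d.2 = (j : Int) →
        dGet (stepA n m x y st d).1 i j ≠ -1) := by
  obtain ⟨hMsh, hMpres, hMnew, app, happ, happP, hcnt⟩ := hM
  have hstep : stepA n m x y st d =
      (if 0 ≤ (x : Int) + d.1 ∧ (x : Int) + d.1 < (n : Int) ∧ 0 ≤ (y : Int) + d.2 ∧
          (y : Int) + d.2 < (m : Int) ∧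
          dGet st.1 ((x : Int) + d.1).toNat ((y : Int) + d.2).toNat = -1 then
        (dSet st.1 ((x : Int) + d.1).toNat ((y : Int) + d.2).toNat (dGet st.1 x y + 1),
          st.2 ++ [(((x : Int) + d.1).toNat, ((y : Int) + d.2).toNat)])
      else st) := rfl
  rw [hstep]
  by_cases hg : 0 ≤ (x : Int) + d.1 ∧ (x : Int) + d.1 < (n : Int) ∧ 0 ≤ (y : Int) + d.2 ∧
      (y : Int) + d.2 < (m : Int) ∧
      dGet st.1 ((x : Int) + d.1).toNat ((y : Int) + d.2).toNat = -1
  · rw [if_pos hg]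
    obtain ⟨hg1, hg2, hg3, hg4, hg5⟩ := hg
    set I := ((x : Int) + d.1).toNat with hIdef
    set J := ((y : Int) + d.2).toNat with hJdef
    have hIc : (I : Int) = (x : Int) + d.1 := Int.toNat_of_nonneg hg1
    have hJc : (J : Int) = (y : Int) + d.2 := Int.toNat_of_nonneg hg3
    have hIn : I < n := by omega
    have hJm : J < m := by omega
    have hxy : dGet st.1 x y = v := by
      rw [hMpres x y (by rw [hv]; omega), hv]
    have hfDIJ : fD (x, y) (I, J) = 1 := by
      unfold fD
      simp only
      rw [show ((x : Int) - I) = -d.1 by omega, show ((y : Int) - J) = -d.2 by omega,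
        abs_neg, abs_neg]
      exact hd
    have hlen1 : I < st.1.length := by omega
    have hlen2 : J < (st.1.getD I []).length := by
      rw [shaped_row_len hMsh hIn]; omega
    have hself : dGet (dSet st.1 I J (dGet st.1 x y + 1)) I J = dGet st.1 x y + 1 :=
      dGet_dSet_self hlen1 hlen2
    have hother : ∀ i j : Nat, (i ≠ I ∨ j ≠ J) →
        dGet (dSet st.1 I J (dGet st.1 x y + 1)) i j = dGet st.1 i j := by
      intro i j hne
      exact dGet_dSet_ne (by tauto)
    have hpresv : ∀ i j, dGet st.1 i j ≠ -1 →
        dGet (dSet st.1 I J (dGet st.1 x y + 1)) i j = dGet st.1 i j := by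
      intro i j hset
      by_cases he : i = I ∧ j = J
      · exact absurd (he.1 ▸ he.2 ▸ hg5) hset
      · exact hother i j (by tauto)
    refine ⟨⟨shaped_dSet hMsh, ?_, ?_, app ++ [(I, J)], by simp [happ], ?_, ?_⟩, ?_, ?_⟩
    · intro i j hdist
      rw [hpresv i j (by rw [hMpres i j hdist]; exact hdist)]
      exact hMpres i j hdist
    · intro i j hi hj hset
      by_cases he : i = I ∧ j = J
      · obtain ⟨rfl, rfl⟩ := he
        right
        exact ⟨hfDIJ, by rw [hself, hxy], by simp⟩
      · rw [hother i j (by tauto)] at hset ⊢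
        rcases hMnew i j hi hj hset with h | ⟨h1, h2, h3⟩
        · exact Or.inl h
        · exact Or.inr ⟨h1, h2, by simp [h3]⟩
    · intro p hp
      rcases List.mem_append.mp hp with hp | hp
      · obtain ⟨q1, q2, q3, q4⟩ := happP p hp
        exact ⟨q1, q2, q3, by rw [hpresv _ _ (by rw [q4]; omega)]; exact q4⟩
      · simp only [List.mem_singleton] at hp
        subst hp
        exact ⟨hIn, hJm, hfDIJ, by rw [hself, hxy]⟩
    · have hdec := negCount_dSet hlen1 hlen2 hg5 (v := dGet st.1 x y + 1) (by omega)
      simp only [List.length_append, List.length_singleton]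
      omega
    · intro i j hset
      exact hpresv i j hset
    · intro i j hi hj hci hcj
      have : i = I ∧ j = J := by omega
      obtain ⟨rfl, rfl⟩ := this
      rw [hself, hxy]
      omega
  · rw [if_neg hg]
    refine ⟨⟨hMsh, hMpres, hMnew, app, happ, happP, hcnt⟩, fun i j h => rfl, ?_⟩
    intro i j hi hj hci hcj
    have h1 : 0 ≤ (x : Int) + d.1 := by omega
    have h3 : 0 ≤ (y : Int) + d.2 := by omega
    have hIJ : ((x : Int) + d.1).toNat = i ∧ ((y : Int) + d.2).toNat = j := by omega
    intro hcon
    apply hg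
    refine ⟨h1, by omega, h3, by omega, ?_⟩
    rw [hIJ.1, hIJ.2]
    exact hcon

lemma pop_mid {n m : Nat} {dist : List (List Int)} {v : Int} {x y : Nat}
    {rest : List (Nat × Nat)}
    (hsh : dist.length = n ∧ ∀ row ∈ dist, row.length = m)
    (hv : dGet dist x y = v) (hv0 : 0 ≤ v) :
    Mid n m dist v x y rest (dirsA.foldl (stepA n m x y) (dist, rest)) ∧
    (∀ i j, i < n → j < m → fD (x, y) (i, j) = 1 →
        dGet (dirsA.foldl (stepA n m x y) (dist, rest)).1 i j ≠ -1) := by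
  have hM0 : Mid n m dist v x y rest (dist, rest) :=
    ⟨hsh, fun i j h => rfl, fun i j hi hj h => Or.inl h, [], by simp, by simp, by simp [negCount]⟩
  obtain ⟨hM1, hP1, hT1⟩ := stepA_mid (d := ((-1 : Int), (0 : Int))) (by decide) hsh hv hv0 hM0
  obtain ⟨hM2, hP2, hT2⟩ := stepA_mid (d := ((1 : Int), (0 : Int))) (by decide) hsh hv hv0 hM1
  obtain ⟨hM3, hP3, hT3⟩ := stepA_mid (d := ((0 : Int), (-1 : Int))) (by decide) hsh hv hv0 hM2
  obtain ⟨hM4, hP4, hT4⟩ := stepA_mid (d := ((0 : Int), (1 : Int))) (by decide) hsh hv hv0 hM3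
  have hfold : dirsA.foldl (stepA n m x y) (dist, rest) =
      stepA n m x y (stepA n m x y (stepA n m x y (stepA n m x y (dist, rest)
        ((-1 : Int), (0 : Int))) ((1 : Int), (0 : Int))) ((0 : Int), (-1 : Int)))
        ((0 : Int), (1 : Int)) := rfl
  rw [hfold]
  refine ⟨hM4, ?_⟩
  intro i j hi hj hadj
  rw [fD_natCast] at hadj
  simp only [Nat.dist] at hadj
  have hcases : (i = x + 1 ∧ j = y) ∨ (x = i + 1 ∧ j = y) ∨
      (i = x ∧ j = y + 1) ∨ (i = x ∧ y = j + 1) := by omega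
  rcases hcases with ⟨h1, h2⟩ | ⟨h1, h2⟩ | ⟨h1, h2⟩ | ⟨h1, h2⟩
  · have hs := hT2 i j hi hj (by omega) (by omega)
    have hs3 := (hP3 i j hs).symm ▸ hs
    exact (hP4 i j hs3).symm ▸ hs3
  · have hs := hT1 i j hi hj (by omega) (by omega)
    have hs2 := (hP2 i j hs).symm ▸ hs
    have hs3 := (hP3 i j hs2).symm ▸ hs2
    exact (hP4 i j hs3).symm ▸ hs3
  · exact hT4 i j hi hj (by omega) (by omega)
  · have hs3 := hT3 i j hi hj (by omega) (by omega)
    exact (hP4 i j hs3).symm ▸ hs3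

lemma pattern_pop {v : Int} {l : List Int} {d : Int} {a b : Nat}
    (h : v :: l = List.replicate a d ++ List.replicate b (d + 1)) :
    ∃ a' b', l = List.replicate a' v ++ List.replicate b' (v + 1) := by
  cases a with
  | zero =>
    cases b with
    | zero => simp at h
    | succ b =>
      rw [List.replicate_succ] at h
      simp only [List.replicate_zero, List.nil_append, List.cons.injEq] at h
      obtain ⟨rfl, rfl⟩ := h
      exact ⟨b, 0, by simp⟩
  | succ a =>
    rw [List.replicate_succ] at h
    simp only [List.cons_append, List.cons.injEq] at h
    obtain ⟨rfl, rfl⟩ := h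
    exact ⟨a, b, rfl⟩

lemma pop_inv {g : List (List Int)} {n m : Nat} {dist : List (List Int)} {x y : Nat}
    {rest : List (Nat × Nat)} (hI : BfsInv g n m dist ((x, y) :: rest)) :
    BfsInv g n m (dirsA.foldl (stepA n m x y) (dist, rest)).1 (dirsA.foldl (stepA n m x y) (dist, rest)).2 ∧
    negCount (dirsA.foldl (stepA n m x y) (dist, rest)).1 +
      (dirsA.foldl (stepA n m x y) (dist, rest)).2.length = negCount dist + rest.length := by
  obtain ⟨hsh, hS, hQ, ⟨d0, a0, b0, hV⟩, hH, hO, hF⟩ := hI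
  obtain ⟨hx, hy, hxy⟩ := hQ (x, y) List.mem_cons_self
  have hTxy : Tm g n m (x, y) = some (dGet dist x y) := hS x y hx hy hxy
  have hv0 : 0 ≤ dGet dist x y := Tm_nonneg hTxy
  obtain ⟨hM, hNb⟩ := pop_mid (rest := rest) hsh rfl hv0
  revert hM hNb
  generalize dirsA.foldl (stepA n m x y) (dist, rest) = st
  intro hM hNb
  obtain ⟨hMsh, hMpres, hMnew, app, happ, happP, hcnt⟩ := hM
  have hmono : ∀ i j, dGet dist i j ≠ -1 → dGet st.1 i j ≠ -1 := by
    intro i j h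
    rw [hMpres i j h]
    exact h
  have hunm : ∀ i j, dGet st.1 i j = -1 → dGet dist i j = -1 := by
    intro i j h
    by_contra hc
    exact (hmono i j hc) h
  -- (S')
  have hS' : ∀ i j, i < n → j < m → dGet st.1 i j ≠ -1 →
      Tm g n m (i, j) = some (dGet st.1 i j) := by
    intro i j hi hj hset
    rcases hMnew i j hi hj hset with hold | ⟨hadj, hval, _⟩
    · rw [hMpres i j hold]
      exact hS i j hi hj hold
    · rw [hval]
      by_cases holdset : dGet dist i j = -1
      · obtain ⟨k, hk⟩ := Tm_some_of_some (c' := (i, j)) hTxy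
        have hk1 : ¬ k ≤ dGet dist x y := by
          intro hle
          exact hH (x, y) rest rfl i j hi hj k hk hle holdset
        have hk2 : k ≤ dGet dist x y + 1 := Tm_adj hadj hTxy hk
        have hkv : k = dGet dist x y + 1 := by omega
        rw [← hkv]
        exact hk
      · have h1 := hS i j hi hj holdset
        rw [hMpres i j holdset] at hval
        rw [← hval]
        exact h1
  -- (F')
  have hF' : ∀ i j, i < n → j < m → dGet st.1 i j = -1 → ∀ k, Tm g n m (i, j) = some k →
      ∃ p : Nat × Nat, p.1 < n ∧ p.2 < m ∧ fD (i, j) p = 1 ∧ Tm g n m p = some (k - 1) ∧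
        (p ∈ st.2 ∨ dGet st.1 p.1 p.2 = -1) := by
    intro i j hi hj hset k hk
    obtain ⟨p, hp1, hp2, hp3, hp4, hp5⟩ := hF i j hi hj (hunm i j hset) k hk
    rcases hp5 with hmem | hup
    · rcases List.mem_cons.mp hmem with rfl | hmem'
      · exfalso
        apply hNb i j hi hj _ hset
        rw [fD_comm] at hp3
        exact hp3
      · exact ⟨p, hp1, hp2, hp3, hp4, Or.inl (happ ▸ List.mem_append_left _ hmem')⟩
    · by_cases hps : dGet st.1 p.1 p.2 = -1
      · exact ⟨p, hp1, hp2, hp3, hp4, Or.inr hps⟩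
      · rcases hMnew p.1 p.2 hp1 hp2 hps with hold | ⟨_, _, hmem2⟩
        · exact absurd hup hold
        · exact ⟨p, hp1, hp2, hp3, hp4, Or.inl hmem2⟩
  -- the value pattern on the new queue
  obtain ⟨a', b', hVr⟩ := pattern_pop (by
    simpa using hV : dGet dist x y :: rest.map (fun p => dGet dist p.1 p.2) =
      List.replicate a0 d0 ++ List.replicate b0 (d0 + 1))
  have hrestmap : rest.map (fun p => dGet st.1 p.1 p.2) =
      rest.map (fun p => dGet dist p.1 p.2) := by
    apply List.map_congr_left
    intro p hp
    exact hMpres p.1 p.2 (hQ p (List.mem_cons_of_mem _ hp)).2.2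
  have happmap : app.map (fun p => dGet st.1 p.1 p.2) =
      List.replicate app.length (dGet dist x y + 1) := by
    rw [List.eq_replicate_iff]
    refine ⟨by simp, ?_⟩
    intro b hb
    obtain ⟨p, hp, rfl⟩ := List.mem_map.mp hb
    exact (happP p hp).2.2.2
  have hVq : st.2.map (fun p => dGet st.1 p.1 p.2) =
      List.replicate a' (dGet dist x y) ++
        List.replicate (b' + app.length) (dGet dist x y + 1) := by
    rw [happ, List.map_append, hrestmap, hVr, happmap, List.replicate_add, List.append_assoc]
  -- (Q')
  have hQ' : ∀ p ∈ st.2, p.1 < n ∧ p.2 < m ∧ dGet st.1 p.1 p.2 ≠ -1 := by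
    intro p hp
    rcases List.mem_append.mp (happ ▸ hp) with hp' | hp'
    · obtain ⟨q1, q2, q3⟩ := hQ p (List.mem_cons_of_mem _ hp')
      exact ⟨q1, q2, hmono p.1 p.2 q3⟩
    · obtain ⟨q1, q2, _, q4⟩ := happP p hp'
      exact ⟨q1, q2, by rw [q4]; omega⟩
  -- (H')
  have hH' : ∀ p rest', st.2 = p :: rest' → ∀ i j, i < n → j < m → ∀ k,
      Tm g n m (i, j) = some k → k ≤ dGet st.1 p.1 p.2 → dGet st.1 i j ≠ -1 := by
    intro p rest' hq i j hi hj k hk hle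
    have hhead : dGet st.1 p.1 p.2 = dGet dist x y ∨
        (dGet st.1 p.1 p.2 = dGet dist x y + 1 ∧ a' = 0) := by
      have : (st.2.map (fun p => dGet st.1 p.1 p.2)) =
          dGet st.1 p.1 p.2 :: rest'.map (fun p => dGet st.1 p.1 p.2) := by
        rw [hq, List.map_cons]
      rw [hVq] at this
      cases a' with
      | zero =>
        cases hb : b' + app.length with
        | zero => rw [hb] at this; simp at this
        | succ t =>
          rw [hb, List.replicate_succ] at this
          simp only [List.replicate_zero, List.nil_append, List.cons.injEq] at this
          exact Or.inr ⟨this.1.symm, rfl⟩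
      | succ a'' =>
        rw [List.replicate_succ] at this
        simp only [List.cons_append, List.cons.injEq] at this
        exact Or.inl this.1.symm
    by_cases hcase : k ≤ dGet dist x y
    · exact hmono i j (hH (x, y) rest rfl i j hi hj k hk hcase)
    · rcases hhead with hh | ⟨hh, ha0⟩
      · omega
      · have hkv : k = dGet dist x y + 1 := by omega
        subst hkv
        -- every queue value is v+1 now
        have hallv : ∀ p' ∈ st.2, dGet st.1 p'.1 p'.2 = dGet dist x y + 1 := by
          intro p' hp'
          have : dGet st.1 p'.1 p'.2 ∈ st.2.map (fun p => dGet st.1 p.1 p.2) :=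
            List.mem_map.mpr ⟨p', hp', rfl⟩
          rw [hVq, ha0] at this
          simp only [List.replicate_zero, List.nil_append] at this
          exact List.eq_of_mem_replicate this
        intro hset
        obtain ⟨p', hp1, hp2, _, hp4, hp5⟩ := hF' i j hi hj hset _ hk
        rcases hp5 with hmem | hup
        · have hval := hallv p' hmem
          have := hS' p'.1 p'.2 hp1 hp2 (by rw [hval]; omega)
          rw [hval] at this
          rw [this] at hp4
          injection hp4 with hp4
          omega
        · have hp4' : Tm g n m p' = some (dGet dist x y) := by
            rw [hp4]; congr 1; ring
          have := hH (x, y) rest rfl p'.1 p'.2 hp1 hp2 _ hp4' le_rfl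
          exact this (hunm p'.1 p'.2 hup)
  refine ⟨⟨hMsh, hS', hQ', ⟨dGet dist x y, a', b' + app.length, hVq⟩, hH', ?_, hF'⟩, ?_⟩
  · intro i j hi hj hone
    exact hmono i j (hO i j hi hj hone)
  · have : st.2.length = rest.length + app.length := by rw [happ]; simp
    omega

lemma final_settled {g : List (List Int)} {n m : Nat} {dist : List (List Int)}
    (hI : BfsInv g n m dist []) :
    ∀ K : Nat, ∀ i j, i < n → j < m → Tm g n m (i, j) = some (K : Int) → dGet dist i j ≠ -1 := by
  intro K
  induction K with
  | zero =>
    intro i j hi hj hT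
    have hmem := Tm_zero_mem (by exact_mod_cast hT)
    exact hI.2.2.2.2.2.1 i j hi hj (mem_onesOf.mp hmem).2.2
  | succ K ih =>
    intro i j hi hj hT
    by_contra hun
    obtain ⟨p, hp1, hp2, _, hTp, hor⟩ := hI.2.2.2.2.2.2 i j hi hj hun _ hT
    rcases hor with hmem | hup
    · simp at hmem
    · have : Tm g n m p = some (K : Int) := by
        rw [hTp]; congr 1; push_cast; ring
      exact ih p.1 p.2 hp1 hp2 (by simpa using this) (by simpa using hup)

lemma dist_eq_target {g : List (List Int)} {n m : Nat} {dist : List (List Int)}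
    (hI : BfsInv g n m dist []) :
    dist = (List.range n).map (fun i => (List.range m).map (fun j => cellB (onesOf g n m) i j)) := by
  have hsh := hI.1
  have hS := hI.2.1
  apply List.ext_getElem (by simp [hsh.1])
  intro i h1 h2
  have hi : i < n := by omega
  have hrow : dist[i].length = m := hsh.2 _ (List.getElem_mem h1)
  simp only [List.getElem_map, List.getElem_range]
  apply List.ext_getElem (by simpa using hrow)
  intro j hj1 hj2
  have hj : j < m := by omega
  have hdg : dGet dist i j = dist[i][j] := by
    unfold dGet
    rw [List.getD_eq_getElem _ _ h1, List.getD_eq_getElem _ _ (by omega)]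
  simp only [List.getElem_map, List.getElem_range]
  rw [cellB_eq_Tm, ← hdg]
  rcases hT : Tm g n m (i, j) with _ | k
  · show dGet dist i j = -1
    by_contra hne
    have hx := hS i j hi hj hne
    rw [hT] at hx
    simp at hx
  · show dGet dist i j = k
    have hk0 := Tm_nonneg hT
    have hset := final_settled hI k.toNat i j hi hj (by rwa [Int.toNat_of_nonneg hk0])
    have hv := hS i j hi hj hset
    rw [hT] at hv
    injection hv with hv
    exact hv.symm

lemma bfs_eq {g : List (List Int)} {n m : Nat} :
    ∀ (fuel : Nat) (dist : List (List Int)) (q : List (Nat × Nat)),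
      BfsInv g n m dist q → negCount dist + q.length ≤ fuel →
      bfsLoop n m fuel dist q =
        (List.range n).map (fun i => (List.range m).map (fun j => cellB (onesOf g n m) i j)) := by
  intro fuel
  induction fuel with
  | zero =>
    intro dist q hI hle
    have hq : q = [] := by
      cases q with
      | nil => rfl
      | cons p t => simp at hle
    subst hq
    exact dist_eq_target hI
  | succ fuel ih =>
    intro dist q hI hle
    cases q with
    | nil => exact dist_eq_target hI
    | cons p t =>
      rcases p with ⟨x, y⟩
      obtain ⟨hI', hcnt⟩ := pop_inv hI
      show bfsLoop n m fuel _ _ = _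
      apply ih _ _ hI'
      simp only [List.length_cons] at hle
      omega

-- ---- the initial state ----

lemma dGet_replicate (n m i j : Nat) :
    dGet (List.replicate n (List.replicate m (-1))) i j = -1 := by
  unfold dGet
  have h1 : (List.replicate n (List.replicate m (-1))).getD i [] =
      if i < n then List.replicate m (-1) else [] := by
    split_ifs with h
    · rw [List.getD_eq_getElem _ _ (by simpa using h), List.getElem_replicate]
    · rw [List.getD_eq_default _ _ (by simpa using h)]
  rw [h1]
  split_ifs with h
  · by_cases hj : j < m
    · rw [List.getD_eq_getElem _ _ (by simpa using hj), List.getElem_replicate]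
    · rw [List.getD_eq_default _ _ (by simpa using hj)]
  · simp

-- the inner loop of the initialisation, row i up to column M
def initRow (g : List (List Int)) (i M : Nat) (st : List (List Int) × List (Nat × Nat)) :
    List (List Int) × List (Nat × Nat) :=
  (List.range M).foldl (fun st j =>
    if gGet g i j = 1 then (dSet st.1 i j 0, st.2 ++ [(i, j)]) else st) st

lemma initRow_spec (g : List (List Int)) (n m i : Nat) (hi : i < n) :
    ∀ M, M ≤ m → ∀ st : List (List Int) × List (Nat × Nat),
      (st.1.length = n ∧ ∀ row ∈ st.1, row.length = m) →
      ((initRow g i M st).1.length = n ∧ ∀ row ∈ (initRow g i M st).1, row.length = m) ∧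
      (initRow g i M st).2 = st.2 ++ (List.range M).filterMap
          (fun b => if gGet g i b = 1 then some (i, b) else none) ∧
      (∀ i' j', dGet (initRow g i M st).1 i' j' =
          if i' = i ∧ j' < M ∧ gGet g i j' = 1 then 0 else dGet st.1 i' j') := by
  intro M
  induction M with
  | zero =>
    intro _ st hsh
    refine ⟨hsh, by simp [initRow], ?_⟩
    intro i' j'
    simp [initRow]
  | succ M ih =>
    intro hM st hsh
    obtain ⟨ih1, ih2, ih3⟩ := ih (by omega) st hsh
    have hrw : initRow g i (M + 1) st =
        (if gGet g i M = 1 then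
          (dSet (initRow g i M st).1 i M 0, (initRow g i M st).2 ++ [(i, M)])
        else initRow g i M st) := by
      unfold initRow
      rw [List.range_succ, List.foldl_append]
      rfl
    have hfm : (List.range (M + 1)).filterMap
          (fun b => if gGet g i b = 1 then some (i, b) else none) =
        (List.range M).filterMap (fun b => if gGet g i b = 1 then some (i, b) else none) ++
          (if gGet g i M = 1 then [(i, M)] else []) := by
      rw [List.range_succ, List.filterMap_append]
      congr 1
      by_cases hone : gGet g i M = 1 <;> simp [hone]
    by_cases hone : gGet g i M = 1
    · rw [hrw, if_pos hone]
      refine ⟨shaped_dSet ih1, ?_, ?_⟩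
      · simp only [ih2, hfm, hone, if_pos]
        rw [List.append_assoc]
      · intro i' j'
        by_cases he : i' = i ∧ j' = M
        · obtain ⟨rfl, rfl⟩ := he
          rw [dGet_dSet_self (by omega) (by rw [shaped_row_len ih1 hi]; omega)]
          rw [if_pos ⟨rfl, by omega, hone⟩]
        · rw [dGet_dSet_ne (by tauto), ih3]
          have hiff : (i' = i ∧ j' < M ∧ gGet g i j' = 1) ↔
              (i' = i ∧ j' < M + 1 ∧ gGet g i j' = 1) := by
            constructor
            · rintro ⟨e1, e2, e3⟩
              exact ⟨e1, by omega, e3⟩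
            · rintro ⟨e1, e2, e3⟩
              refine ⟨e1, ?_, e3⟩
              by_cases hj' : j' < M
              · exact hj'
              · exact absurd ⟨e1, by omega⟩ he
          simp only [hiff]
    · rw [hrw, if_neg hone]
      refine ⟨ih1, ?_, ?_⟩
      · simp only [ih2, hfm, hone]
        simp
      · intro i' j'
        rw [ih3]
        have hiff : (i' = i ∧ j' < M ∧ gGet g i j' = 1) ↔
            (i' = i ∧ j' < M + 1 ∧ gGet g i j' = 1) := by
          constructor
          · rintro ⟨e1, e2, e3⟩
            exact ⟨e1, by omega, e3⟩
          · rintro ⟨e1, e2, e3⟩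
            refine ⟨e1, ?_, e3⟩
            by_cases hj' : j' < M
            · exact hj'
            · have hjM : j' = M := by omega
              exact absurd (hjM ▸ e3) hone
        simp only [hiff]
  
lemma initFold_spec (g : List (List Int)) (n m : Nat) :
    ((initFold g n m).1.length = n ∧ ∀ row ∈ (initFold g n m).1, row.length = m) ∧
    (∀ i j, dGet (initFold g n m).1 i j =
        if i < n ∧ j < m ∧ gGet g i j = 1 then 0 else -1) ∧
    (initFold g n m).2 = onesOf g n m := by
  suffices h : ∀ N, N ≤ n →
      (((List.range N).foldl (fun st i => (List.range m).foldl (fun st j =>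
          if gGet g i j = 1 then (dSet st.1 i j 0, st.2 ++ [(i, j)]) else st) st)
          (List.replicate n (List.replicate m (-1)), [])).1.length = n ∧
        ∀ row ∈ ((List.range N).foldl (fun st i => (List.range m).foldl (fun st j =>
          if gGet g i j = 1 then (dSet st.1 i j 0, st.2 ++ [(i, j)]) else st) st)
          (List.replicate n (List.replicate m (-1)), [])).1, row.length = m) ∧
      (∀ i j, dGet ((List.range N).foldl (fun st i => (List.range m).foldl (fun st j =>
          if gGet g i j = 1 then (dSet st.1 i j 0, st.2 ++ [(i, j)]) else st) st)
          (List.replicate n (List.replicate m (-1)), [])).1 i j =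
          if i < N ∧ j < m ∧ gGet g i j = 1 then 0 else -1) ∧
      ((List.range N).foldl (fun st i => (List.range m).foldl (fun st j =>
          if gGet g i j = 1 then (dSet st.1 i j 0, st.2 ++ [(i, j)]) else st) st)
          (List.replicate n (List.replicate m (-1)), [])).2 = onesOf g N m by
    exact h n le_rfl
  intro N
  induction N with
  | zero =>
    intro _
    refine ⟨⟨by simp, ?_⟩, ?_, ?_⟩
    · intro row hrow
      simp only [List.range_zero, List.foldl_nil] at hrow
      rw [List.eq_of_mem_replicate hrow]
      simp
    · intro i j
      simp only [List.range_zero, List.foldl_nil]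
      rw [dGet_replicate]
      simp
    · simp [onesOf]
  | succ N ihN =>
    intro hN
    obtain ⟨ih1, ih2, ih3⟩ := ihN (by omega)
    have hrw : (List.range (N + 1)).foldl (fun st i => (List.range m).foldl (fun st j =>
          if gGet g i j = 1 then (dSet st.1 i j 0, st.2 ++ [(i, j)]) else st) st)
          (List.replicate n (List.replicate m (-1)), []) =
        initRow g N m ((List.range N).foldl (fun st i => (List.range m).foldl (fun st j =>
          if gGet g i j = 1 then (dSet st.1 i j 0, st.2 ++ [(i, j)]) else st) st)
          (List.replicate n (List.replicate m (-1)), [])) := by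
      rw [List.range_succ, List.foldl_append]
      rfl
    obtain ⟨hr1, hr2, hr3⟩ := initRow_spec g n m N (by omega) m le_rfl _ ih1
    rw [hrw]
    refine ⟨hr1, ?_, ?_⟩
    · intro i j
      rw [hr3, ih2]
      by_cases hiN : i = N
      · subst hiN
        by_cases hc : j < m ∧ gGet g i j = 1
        · rw [if_pos ⟨rfl, hc⟩, if_pos ⟨by omega, hc⟩]
        · rw [if_neg (by tauto), if_neg (by tauto), if_neg (by tauto)]
      · rw [if_neg (by tauto)]
        have hiff : (i < N ∧ j < m ∧ gGet g i j = 1) ↔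
            (i < N + 1 ∧ j < m ∧ gGet g i j = 1) := by
          constructor
          · rintro ⟨e1, e2, e3⟩
            exact ⟨by omega, e2, e3⟩
          · rintro ⟨e1, e2, e3⟩
            exact ⟨by omega, e2, e3⟩
        simp only [hiff]
    · rw [hr2, ih3]
      unfold onesOf
      rw [List.range_succ, List.flatMap_append]
      simp

lemma init_inv (g : List (List Int)) (n m : Nat) :
    BfsInv g n m (initFold g n m).1 (initFold g n m).2 := by
  obtain ⟨hsh, hD, hq⟩ := initFold_spec g n m
  have hset : ∀ i j, i < n → j < m → gGet g i j = 1 → dGet (initFold g n m).1 i j = 0 := by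
    intro i j hi hj hone
    rw [hD, if_pos ⟨hi, hj, hone⟩]
  refine ⟨hsh, ?_, ?_, ?_, ?_, ?_, ?_⟩
  · intro i j hi hj hne
    rw [hD] at hne
    by_cases h1 : i < n ∧ j < m ∧ gGet g i j = 1
    · rw [hD, if_pos h1, Tm_of_mem (mem_onesOf.mpr ⟨hi, hj, h1.2.2⟩)]
    · rw [if_neg h1] at hne
      simp at hne
  · intro p hp
    rw [hq] at hp
    obtain ⟨h1, h2, h3⟩ := mem_onesOf.mp hp
    exact ⟨h1, h2, by rw [hset p.1 p.2 h1 h2 h3]; omega⟩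
  · refine ⟨0, (initFold g n m).2.length, 0, ?_⟩
    simp only [List.replicate_zero, List.append_nil]
    rw [List.eq_replicate_iff]
    refine ⟨by simp, ?_⟩
    intro b hb
    obtain ⟨p, hp, rfl⟩ := List.mem_map.mp hb
    rw [hq] at hp
    obtain ⟨h1, h2, h3⟩ := mem_onesOf.mp hp
    exact hset p.1 p.2 h1 h2 h3
  · intro p rest' hqq i j hi hj k hT hle
    have hp : p ∈ (initFold g n m).2 := by rw [hqq]; exact List.mem_cons_self
    rw [hq] at hp
    obtain ⟨h1, h2, h3⟩ := mem_onesOf.mp hp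
    rw [hset p.1 p.2 h1 h2 h3] at hle
    have hk0 := Tm_nonneg hT
    have hk : k = 0 := by omega
    subst hk
    obtain ⟨hi', hj', hone⟩ := mem_onesOf.mp (Tm_zero_mem hT)
    rw [hset i j hi hj hone]
    omega
  · intro i j hi hj hone
    rw [hset i j hi hj hone]
    omega
  · intro i j hi hj hun k hT
    have hnotone : ¬ gGet g i j = 1 := by
      intro hone
      rw [hset i j hi hj hone] at hun
      omega
    have hk0 := Tm_nonneg hT
    have hk1 : 1 ≤ k := by
      rcases eq_or_lt_of_le hk0 with h0 | h0
      · exfalso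
        exact hnotone (mem_onesOf.mp (Tm_zero_mem (h0 ▸ hT))).2.2
      · omega
    obtain ⟨c', hc1, hc2, hc3, hc4⟩ := Tm_step hi hj hT hk1
    refine ⟨c', hc1, hc2, hc3, hc4, ?_⟩
    by_cases hone' : gGet g c'.1 c'.2 = 1
    · exact Or.inl (by rw [hq]; exact mem_onesOf.mpr ⟨hc1, hc2, hone'⟩)
    · refine Or.inr ?_
      rw [hD]
      split_ifs with h1
      · exact absurd h1.2.2 hone'
      · rfl

-- ===== VERDICT (by name: the statement is the Claim_ definition above) =====
theorem nearest_spec : Claim_equal_nearest := by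
  unfold Claim_equal_nearest Spec_nearest
  intro grid _ _
  show bfsLoop grid.length (grid.headD []).length
      (grid.length * (grid.headD []).length + (initFold grid grid.length (grid.headD []).length).2.length)
      (initFold grid grid.length (grid.headD []).length).1
      (initFold grid grid.length (grid.headD []).length).2 = nearest_alt grid
  rw [nearest_alt_eq]
  apply bfs_eq _ _ _ (init_inv grid grid.length (grid.headD []).length)
  have h1 := negCount_le (initFold_spec grid grid.length (grid.headD []).length).1
  rw [Nat.mul_comm] at h1
  omega
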